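/- GENERATED by mk_final_copies.py from the proof of the farm's unit `start_decoder.C4c` (farm:start_decoder.C4c.1: Proof.lean) as the
   re-elaboration sweep compiled it — do not edit. -/
import Asan.CheckWalk
import Vorbis.Spec.Reader
import Vorbis.Spec.Units.start_decoder_C4c
import Vorbis.Spec.Worked.start_decoder_C4c_Lemmas

open X86 X86.User Asan Vorbis Vorbis.Spec Vorbis.Spec.StartDecoder

set_option maxRecDepth 4000
set_option maxHeartbeats 4000000

namespace Vorbis.Spec.start_decoder_C4c

/-- **Segment C4c of `start_decoder`** (`cut121` 0x1147a1, the return of `get_bits(f, 5)`): the checked store `lengths[j] = eax + 1`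
(`C4.lengths_site`), `++total`, the `== 32` test; then `++j` and `InC4Next` at the head (`C4.next_of_store`), or the call of
`error(f, VORBIS_invalid_setup)` and `InC4Err` at its return `cut124`. -/
theorem segC4c_walk {Lay : Layout} (hLay : Lay.hi = 0x1000000) {μ : Microarch} (hμ : UserX.MicroOK μ) {u₀ : State}
    (hcode : HasCodeNat Lay u₀ Vorbis.L.start_decoder.entry Vorbis.Code.code_start_decoder.nat Vorbis.L.start_decoder.size)
    (hst1 : Asan.SmallCheck Lay μ Vorbis.WayInv (Vorbis.CodeOK u₀) [.rax, .rdx] 1 Vorbis.L.__asan_store1_noabort.entry)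
    (herr : ∀ (others : List Obj) (frames : List (Nat × FrameLayout)), Calls Lay μ Vorbis.WayInv (Vorbis.conv u₀) Vorbis.L.error.entry (Vorbis.Spec.error.spec others frames))
    {g : Ghost} {i : Nat} {A2 A3 Ai : Arena} {A : Arena × List Obj} {lengths E j : Nat} {v : State}
    (hat : InC4Mid u₀ g i A2 A3 Ai A lengths E j Vorbis.L.start_decoder.cut121 v) :
    ReachVia Lay μ WayInv v (fun w => InC4Next u₀ g i A2 A3 Ai A lengths E j w ∨ InC4Err u₀ g A w) := by
  have hfr := hat.frame
  have he := hfr.entry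
  v_entry he
  simp only [depth] at he_room he_stack
  have w_rip := hfr.rip
  obtain ⟨hr1, hr2⟩ := hfr.r_eq
  simp only [steady] at hr1
  have hRA : g.RA = (g.e.reg .rsp).toNat := rfl
  have c_rsp : v.reg .rsp = g.e.reg .rsp - 1480 := by
    rw [hfr.rsp]
    refine (eq_addr _ _ ?_).symm
    unfold Ghost.R Ghost.RA steady
    u_omega
  have hE : (Codebook.entries v.mem (g.cb v.mem i)).toNat = E := hat.ent
  have hjE : j < (Codebook.entries v.mem (g.cb v.mem i)).toNat := by
    rw [hE]
    exact hat.j_lt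
  have hj31 : j < 2 ^ 31 := by
    have := hat.k1.ent_lt
    omega
  have htot := usedCount_le v.mem lengths j
  have hz := hat.rax5 rfl
  obtain ⟨z, hzlt, c_rax⟩ : ∃ z, z < 32 ∧ v.reg .rax = UInt64.ofNat z := ⟨_, hz, (UInt64.ofNat_toNat).symm⟩
  have c_r12 : v.reg .r12 = UInt64.ofNat j := hat.r12
  have c_rbx := hat.rbx
  have c_rbp : v.reg .rbp = UInt64.ofNat (usedCount v.mem lengths j) := hat.rbp
  have sl_f : v.mem.readLE (g.e.reg .rsp - 1456) 8 = g.f := by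
    have e : addr (g.R + 0x18) = g.e.reg .rsp - 1456 := by
      refine (eq_addr _ _ ?_).symm
      unfold Ghost.R Ghost.RA steady
      u_omega
    rw [← e]
    exact hat.cur.slot_f
  have hst := C4.obj_stack hfr hat.cur.hand
  obtain ⟨lw1, lw2, lw3, lw4⟩ := C4.lengths_where hat.cur.sd.arena (fun B hB => hB.1) hat.place
  rw [hE] at lw2 lw3 lw4
  have htx := hat.cur.hand.arenaText
  simp only [Vorbis.L.textHi] at htx
  have hbw : UInt64.ofNat j + addr lengths = addr (lengths + j) := by
    rw [UInt64.add_comm]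
    exact addr_add lengths j
  have hbn : (addr (lengths + j)).toNat = lengths + j := toNat_addr _ (by omega)
  have hbv : (BitVec.setWidth 8 (BitVec.setWidth 32 (UInt64.ofNat z + 1).toBitVec)).toNat = z + 1 := by
    have e1 : (UInt64.ofNat z + 1).toNat = z + 1 := by u_omega
    simp only [BitVec.toNat_setWidth, UInt64.toNat_toBitVec, e1]
    omega
  have w_eq : Mem.EqOn Vorbis.L.textLo Vorbis.L.textHi u₀.mem v.mem := hfr.code
  have hdf : v.flags .df = false := (show abiInv _ from hfr.inv).1
  have hmx : v.mxcsr &&& 0x1F80 = 0x1F80 := (show abiInv _ from hfr.inv).2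
  have hsse := Vorbis.sseOK_of_abiInv hfr.inv
  have herr' := herr A.2 g.frames'
  u_walk hcode [hμ.vendor, Vorbis.Spec.cnt32_sext j hj31, Vorbis.Spec.cnt32_succ j (by omega),
      Vorbis.Spec.cnt32_succ (usedCount v.mem lengths j) (by omega), hbv]
    until [Vorbis.L.start_decoder.cut122, Vorbis.L.start_decoder.cut124] span [Vorbis.L.textLo, Vorbis.L.textHi] side (v_side)
  case check_1147ae =>
    have hun : ShadowUntouched v.mem s_1147ae.mem := by v_untouched
    rw [hbw]
    exact C4.lengths_site hat.cur.sd.arena hfr.shadow hun (fun B hB => hB.1) hat.place hjE hbn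
  case call_inv => v_inv
  case pre_11481b =>
    have hun : ShadowUntouched v.mem s_11481b.mem := by v_untouched
    have t1 : (g.e.reg .rsp - 1488).toNat = (g.e.reg .rsp).toNat - 1488 := by u_omega
    have hobr := hat.cur.sd.bits.OBR
    simp only [voff] at hobr
    have hf : (s_11481b.reg .rdi).toNat = g.f := by
      rw [w_rdi]
      exact toNat_addr g.f (by omega)
    have hrs : (s_11481b.reg .rsp).toNat + 8 = g.R := by
      rw [w_rsp, t1]
      omega
    refine ⟨⟨?_, hfr.offText⟩, ?_⟩
    · rw [hrs]
      exact hfr.shadow.untouched hun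
    · rw [hf]
      exact hat.cur.hand.obj.mono (C4.sub_frames g A)
  · -- the return of `error`: `InC4Err` at `cut124`
    v_after_call w_rsp_11481b w_mem_11481b
    have t1 : (g.e.reg .rsp - 1488).toNat = (g.e.reg .rsp).toNat - 1488 := by u_omega
    have hobr := hat.cur.sd.bits.OBR
    simp only [voff] at hobr
    have hout := hat.cur.hand.objOut
    simp only [voff] at hout
    have hf : (s_11481b.reg .rdi).toNat = g.f := by
      rw [w_rdi_11481b]
      exact toNat_addr g.f (by omega)
    simp only [hf, t1] at w_same
    rw [hbw] at w_same
    -- the caller's own stores: two pushed return addresses and the byte of `lengths[j]`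
    have hpush : ∃ w ∈ [(⟨g.R - 408, g.R⟩ : Span), ⟨lengths + j, lengths + j + 1⟩],
        w.lo ≤ (g.e.reg .rsp - 1488).toNat ∧ (g.e.reg .rsp - 1488).toNat + 8 ≤ w.hi := by
      refine ⟨⟨g.R - 408, g.R⟩, List.mem_cons_self, ?_, ?_⟩
      · rw [t1]
        show g.R - 408 ≤ _
        omega
      · rw [t1]
        show _ ≤ g.R
        omega
    have hcall : Mem.SameExcept [⟨g.R - 408, g.R⟩, ⟨lengths + j, lengths + j + 1⟩] v.mem
        (((v.mem.writeLE (g.e.reg .rsp - 1488) 8 1132467).writeLE (addr (lengths + j)) 1 (z + 1)).writeLE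
          (g.e.reg .rsp - 1488) 8 1132576) := by
      refine Mem.SameExcept.step_writeLE _ 8 _ (Mem.SameExcept.step_writeLE _ 1 _
        (Mem.SameExcept.writeLE _ v.mem _ 8 _ ?_ hpush) ?_ ?_) ?_ hpush
      · rw [t1]
        omega
      · rw [hbn]
        omega
      · refine ⟨⟨lengths + j, lengths + j + 1⟩, List.mem_cons_of_mem _ List.mem_cons_self, ?_, ?_⟩
        · rw [hbn]
          exact Nat.le_refl _
        · rw [hbn]
          exact Nat.le_refl _
      · rw [t1]
        omega
    have hag1 : C4.Agree g.R g.f (lengths + j) 1 v.mem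
        (((v.mem.writeLE (g.e.reg .rsp - 1488) 8 1132467).writeLE (addr (lengths + j)) 1 (z + 1)).writeLE
          (g.e.reg .rsp - 1488) 8 1132576) := by
      apply C4.Agree.of_sameExcept hcall
      intro w hw
      simp only [List.mem_cons, List.not_mem_nil, or_false] at hw
      rcases hw with rfl | rfl
      · left
        exact ⟨Nat.le_refl _, Nat.le_refl _⟩
      · right; right; right; right; right; right
        exact ⟨Nat.le_refl _, Nat.le_refl _⟩
    have hag2 : C4.Agree g.R g.f (lengths + j) 1
        (((v.mem.writeLE (g.e.reg .rsp - 1488) 8 1132467).writeLE (addr (lengths + j)) 1 (z + 1)).writeLE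
          (g.e.reg .rsp - 1488) 8 1132576) s_11481br.mem := by
      apply C4.Agree.of_sameExcept w_same
      intro w hw
      simp only [List.mem_cons, List.not_mem_nil, or_false] at hw
      rcases hw with rfl | rfl
      · left
        dsimp only
        omega
      · right; right; right; left
        dsimp only
        omega
    have hag := hag1.trans hag2
    -- `Bits`: the caller's stores miss `*f`, error's store is `f->error`
    have heq1 : Mem.EqOn g.f (g.f + 1808) v.mem
        (((v.mem.writeLE (g.e.reg .rsp - 1488) 8 1132467).writeLE (addr (lengths + j)) 1 (z + 1)).writeLE
          (g.e.reg .rsp - 1488) 8 1132576) := by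
      apply hcall.eqOn
      intro w hw
      simp only [List.mem_cons, List.not_mem_nil, or_false] at hw
      rcases hw with rfl | rfl
      · show g.f + 1808 ≤ g.R - 408 ∨ g.R ≤ g.f
        exact hst
      · show g.f + 1808 ≤ lengths + j ∨ lengths + j + 1 ≤ g.f
        omega
    have hbits1 := C4.bits_same hat.cur heq1
    have sf2 : Bits.SameFields
        (((v.mem.writeLE (g.e.reg .rsp - 1488) 8 1132467).writeLE (addr (lengths + j)) 1 (z + 1)).writeLE
          (g.e.reg .rsp - 1488) 8 1132576) s_11481br.mem g.f := by
      apply Bits.SameFields.of_sameExcept w_same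
      all_goals
        intro w hw
        simp only [List.mem_cons, List.not_mem_nil, or_false] at hw
        rcases hw with rfl | rfl
        · dsimp only
          omega
        · dsimp only
          omega
    have hbits : Bits (g.Blk A) g.len s_11481br.mem g.f := hbits1.frame_fields sf2
    have hp : s_11481br.reg .rax = 0 ∧ ShadowUntouched s_11481b.mem s_11481br.mem ∧
        s_11481br.mem.readLE (s_11481b.reg .rdi + 140) 4 = (s_11481b.reg .rsi).toNat % 2 ^ 32 := w_post
    have habi : abiInv s_11481br := Vorbis.abiInv_of w_df w_mx
    have hrsp : s_11481br.reg .rsp = v.reg .rsp := by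
      rw [w_rsp, c_rsp]
    exact ReachVia.done (Or.inr (c4c_err_exit hat hag hbits w_rip hrsp habi (w_kept .r14 rfl) hp.1))
  · -- `lengths[j] = eax + 1 ; ++total ; ++j`: back at the head, `InC4Next`
    rw [hbw] at w_mem
    have t1 : (g.e.reg .rsp - 1488).toNat = (g.e.reg .rsp).toNat - 1488 := by u_omega
    have hout := hat.cur.hand.objOut
    simp only [voff] at hout
    have hsame : Mem.SameExcept [⟨g.R - 408, g.R⟩, ⟨lengths + j, lengths + j + 1⟩] v.mem s_1147bf.mem := by
      rw [w_mem]
      refine Mem.SameExcept.step_writeLE _ 1 _ (Mem.SameExcept.writeLE _ v.mem _ 8 _ ?_ ?_) ?_ ?_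
      · rw [t1]
        omega
      · refine ⟨⟨g.R - 408, g.R⟩, List.mem_cons_self, ?_, ?_⟩
        · rw [t1]
          show g.R - 408 ≤ _
          omega
        · rw [t1]
          show _ ≤ g.R
          omega
      · rw [hbn]
        omega
      · refine ⟨⟨lengths + j, lengths + j + 1⟩, List.mem_cons_of_mem _ List.mem_cons_self, ?_, ?_⟩
        · rw [hbn]
          exact Nat.le_refl _
        · rw [hbn]
          exact Nat.le_refl _
    have hag : C4.Agree g.R g.f (lengths + j) 1 v.mem s_1147bf.mem := by
      apply C4.Agree.of_sameExcept hsame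
      intro w hw
      simp only [List.mem_cons, List.not_mem_nil, or_false] at hw
      rcases hw with rfl | rfl
      · left
        exact ⟨Nat.le_refl _, Nat.le_refl _⟩
      · right; right; right; right; right; right
        exact ⟨Nat.le_refl _, Nat.le_refl _⟩
    have heq : Mem.EqOn g.f (g.f + 1808) v.mem s_1147bf.mem := by
      apply hsame.eqOn
      intro w hw
      simp only [List.mem_cons, List.not_mem_nil, or_false] at hw
      rcases hw with rfl | rfl
      · show g.f + 1808 ≤ g.R - 408 ∨ g.R ≤ g.f
        exact hst
      · show g.f + 1808 ≤ lengths + j ∨ lengths + j + 1 ≤ g.f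
        omega
    have habi : abiInv s_1147bf := by
      refine Vorbis.abiInv_of ?_ ?_
      · rw [w_flags]
        simp only [X86.User.df_setStatus]
        exact w_df_1147ae
      · rw [w_mxcsr]
        exact hmx
    have hbyte : s_1147bf.mem.u8 (lengths + j) = z + 1 := by
      unfold Mem.u8
      rw [w_mem, Mem.readLE_writeLE_same _ _ 1 _ (by decide)]
      omega
    have hrsp : s_1147bf.reg .rsp = v.reg .rsp := by
      rw [w_rsp, c_rsp]
    refine ReachVia.done (Or.inl ?_)
    refine C4.next_of_store hat hag (C4.bits_same hat.cur heq) w_rip hrsp habi w_r12 ((w_kept .rbx rfl).trans c_rbx)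
      (w_kept .r14 rfl) (Or.inl ?_) (Or.inr ⟨?_, w_rbp⟩)
    · rw [hbyte]
      omega
    · rw [hbyte]
      omega

end Vorbis.Spec.start_decoder_C4c

/-- The unit `start_decoder.C4c`: `segC4c_walk` at every entry state. -/
theorem Vorbis.Spec.Worked.start_decoder_C4c_ok : Vorbis.Spec.start_decoder_C4c.Statement := by
  intro Lay hLay μ hμ u₀ hcode hst1 herr g i A2 A3 Ai A lengths E j v hat
  exact Vorbis.Spec.start_decoder_C4c.segC4c_walk hLay hμ hcode hst1 herr hat
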